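-- pv_equiv track=rewrite | github.com/kuznetsovvj/education | algorithms/codeforces/1538b.py | solution
-- ===== SOURCE A (Python) =====
-- def solution(items):
--     s = sum(items)
--     l = len(items)
--     if s % l != 0:
--         return -1
--     m = s // l
--     res = 0
--     for i in items:
--         if i > m:
--             res += 1
--     return res
-- ===== SOURCE B (Python) =====
-- def solution(items):
--     s = sum(items)
--     l = len(items)
--     if s % l != 0:
--         return -1
--     m = s // l
--     a = sorted(items)
--     lo, hi = 0, l
--     while lo < hi:
--         mid = (lo + hi) // 2
--         if a[mid] <= m:
--             lo = mid + 1
--         else: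
--             hi = mid
--     return l - lo
-- ===== Notes on version B (the rewrite author's own statement) =====
-- stated objective: alternative
-- what changed: B replaces A's linear scan counting elements above the mean by sort-then-binary-search: it sorts the list and binary-searches the first index whose value exceeds the mean, returning len minus that index.
import Mathlib
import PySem

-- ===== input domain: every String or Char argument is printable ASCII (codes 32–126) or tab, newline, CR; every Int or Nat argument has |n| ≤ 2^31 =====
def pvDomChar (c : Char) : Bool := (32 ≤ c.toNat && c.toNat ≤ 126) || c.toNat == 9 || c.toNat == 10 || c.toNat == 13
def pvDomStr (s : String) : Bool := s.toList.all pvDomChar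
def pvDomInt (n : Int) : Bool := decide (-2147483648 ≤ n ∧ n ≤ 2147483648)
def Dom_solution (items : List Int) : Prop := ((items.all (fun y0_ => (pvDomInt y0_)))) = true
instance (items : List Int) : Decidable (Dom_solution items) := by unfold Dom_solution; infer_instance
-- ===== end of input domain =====

-- B replaces A's linear count of elements above the mean by sort + hand-written binary search
-- for the first element exceeding the mean (alternative decomposition, not claimed faster).


-- ===== PORT A =====
def solution (items : List Int) : Int :=
  let s := items.sum
  let l : Int := items.length
  if PySem.Int.mod s l ≠ 0 then -1
  else
    let m := PySem.Int.floordiv s l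
    items.foldl (fun res i => if i > m then res + 1 else res) 0

-- ===== PORT B =====
-- while lo < hi loop of Source B; a[mid] is in range (0 ≤ lo ≤ mid < hi ≤ len a), so getD is exact
def bsearchB (a : List Int) (m : Int) (lo hi : Nat) : Nat :=
  if _h : lo < hi then
    let mid := (lo + hi) / 2
    if a.getD mid 0 ≤ m then bsearchB a m (mid + 1) hi else bsearchB a m lo mid
  else lo
termination_by hi - lo
decreasing_by all_goals omega

def solution_alt (items : List Int) : Int :=
  let s := items.sum
  let l : Int := items.length
  if PySem.Int.mod s l ≠ 0 then -1
  else
    let m := PySem.Int.floordiv s l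
    let a := PySem.List.sorted items (fun x => x) false
    l - (bsearchB a m 0 items.length : Int)

-- ===== PRECONDITION & SPEC =====
-- Python raises ZeroDivisionError at 's % l' when items is empty; both A and B raise there.
def Pre_solution (items : List Int) : Prop := items ≠ []
instance (items : List Int) : Decidable (Pre_solution items) := by unfold Pre_solution; infer_instance
def pvWitness_solution : List Int := [2, 4]

def Spec_solution (items : List Int) (out : Int) : Prop := out = solution_alt items
instance (items : List Int) (out : Int) : Decidable (Spec_solution items out) := by unfold Spec_solution; infer_instance

-- ===== CLAIM (what is proved, stated in full; the proofs are below) =====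
def Claim_equal_solution : Prop := ∀ (items : List Int), Dom_solution items → Pre_solution items → Spec_solution items (solution items)

-- ===== LEMMAS AND PROOFS =====

lemma foldl_count_gt (m : Int) (items : List Int) (c : Int) :
    items.foldl (fun res i => if i > m then res + 1 else res) c
      = c + (items.countP (fun i => decide (m < i)) : Int) := by
  induction items generalizing c with
  | nil => simp
  | cons x xs ih =>
      simp only [List.foldl_cons, List.countP_cons, ih]
      by_cases h : m < x <;> simp [h] <;> ring

lemma bsearchB_inv (a : List Int) (m : Int)
    (hs : ∀ (p q : Nat) (hp : p < a.length) (hq : q < a.length), p ≤ q → a[p] ≤ a[q]) :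
    ∀ (lo hi : Nat), lo ≤ hi → hi ≤ a.length →
      (∀ (j : Nat) (hj : j < a.length), j < lo → a[j] ≤ m) →
      (∀ (j : Nat) (hj : j < a.length), hi ≤ j → m < a[j]) →
      bsearchB a m lo hi ≤ a.length ∧
      (∀ (j : Nat) (hj : j < a.length), j < bsearchB a m lo hi → a[j] ≤ m) ∧
      (∀ (j : Nat) (hj : j < a.length), bsearchB a m lo hi ≤ j → m < a[j]) := by
  intro lo hi
  induction lo, hi using bsearchB.induct a m with
  | case1 lo hi h mid hle ih =>
      intro hlh hhlen hlow hhigh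
      have hmid : mid < a.length := by omega
      have hg : a[mid]?.getD 0 = a[mid] := by simp [List.getElem?_eq_getElem hmid]
      have hle' : a[mid] ≤ m := by rw [List.getD_eq_getElem a 0 hmid] at hle; exact hle
      have := ih (by omega) hhlen
        (fun j hj hjlt => le_trans (hs j mid hj hmid (by omega)) hle') hhigh
      rw [bsearchB]
      simpa [h, mid, List.getD, hg, hle'] using this
  | case2 lo hi h mid hgt ih =>
      intro hlh hhlen hlow hhigh
      have hmid : mid < a.length := by omega
      have hg : a[mid]?.getD 0 = a[mid] := by simp [List.getElem?_eq_getElem hmid]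
      have hgt' : m < a[mid] := by
        rw [List.getD_eq_getElem a 0 hmid] at hgt; omega
      have := ih (by omega) (by omega) hlow
        (fun j hj hjge => lt_of_lt_of_le hgt' (hs mid j hmid hj hjge))
      rw [bsearchB]
      simpa [h, mid, List.getD, hg, hgt'.not_ge] using this
  | case3 lo hi h =>
      intro hlh hhlen hlow hhigh
      rw [bsearchB]
      simp only [h, dite_false]
      exact ⟨by omega, fun j hj hjlt => hlow j hj hjlt, fun j hj hjge => hhigh j hj (by omega)⟩

lemma count_gt_of_split (a : List Int) (m : Int) (k : Nat) (hk : k ≤ a.length)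
    (h1 : ∀ (j : Nat) (hj : j < a.length), j < k → a[j] ≤ m)
    (h2 : ∀ (j : Nat) (hj : j < a.length), k ≤ j → m < a[j]) :
    a.countP (fun i => decide (m < i)) = a.length - k := by
  have hsplit : a = a.take k ++ a.drop k := (List.take_append_drop k a).symm
  have htake : (a.take k).countP (fun i => decide (m < i)) = 0 := by
    rw [List.countP_eq_zero]
    intro x hx
    obtain ⟨i, hi, hieq⟩ := List.mem_take_iff_getElem.mp hx
    have : a[i] ≤ m := h1 i (by omega) (by omega)
    simp only [decide_eq_true_eq]
    omega
  have hdrop : (a.drop k).countP (fun i => decide (m < i)) = (a.drop k).length := by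
    rw [List.countP_eq_length]
    intro x hx
    obtain ⟨i, hi, hieq⟩ := List.getElem_of_mem hx
    have hki : k + i < a.length := by
      have := List.length_drop (l := a) (i := k); omega
    rw [List.getElem_drop] at hieq
    have : m < a[k + i] := h2 (k + i) hki (by omega)
    simp only [decide_eq_true_eq]
    omega
  calc a.countP (fun i => decide (m < i))
      = (a.take k ++ a.drop k).countP (fun i => decide (m < i)) := by rw [← hsplit]
    _ = 0 + (a.drop k).length := by rw [List.countP_append, htake, hdrop]
    _ = a.length - k := by simp

-- ===== VERDICT (by name: the statement is the Claim_ definition above) =====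
theorem solution_spec : Claim_equal_solution := by
  intro items _hdom hpre
  unfold Spec_solution solution solution_alt
  simp only []
  set s := items.sum
  set l : Int := (items.length : Int)
  by_cases hmod : PySem.Int.mod s l ≠ 0
  · simp [hmod]
  · simp only [hmod, ite_false]
    set m := PySem.Int.floordiv s l
    set a := PySem.List.sorted items (fun x => x) false with ha
    have hperm : a.Perm items := PySem.List.sorted_perm items (fun x => x) false
    have hlen : a.length = items.length := hperm.length_eq
    have hpw : a.Pairwise (fun x y => x ≤ y) :=
      PySem.List.sorted_pairwise items (fun x => x)
    have hmono : ∀ (p q : Nat) (hp : p < a.length) (hq : q < a.length), p ≤ q → a[p] ≤ a[q] := by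
      intro p q hp hq hpq
      rcases Nat.eq_or_lt_of_le hpq with rfl | hlt
      · exact le_refl _
      · exact (List.pairwise_iff_getElem.mp hpw) p q hp hq hlt
    have hinv := bsearchB_inv a m hmono 0 items.length (Nat.zero_le _) (by omega)
      (by intro j hj hjlt; omega) (by intro j hj hjge; omega)
    set k := bsearchB a m 0 items.length with hkdef
    obtain ⟨hk, h1, h2⟩ := hinv
    have hcount : a.countP (fun i => decide (m < i)) = a.length - k :=
      count_gt_of_split a m k hk h1 h2
    have hcount' : items.countP (fun i => decide (m < i)) = items.length - k := by
      rw [← hperm.countP_eq, hcount, hlen]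
    rw [foldl_count_gt, hcount']
    have : k ≤ items.length := by omega
    push_cast [Int.ofNat_sub this]
    omega
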